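-- pv_equiv track=rewrite | github.com/WonderBattle/RouletteStudy | experiment_strategies/exp_strategies_american.py | find_interesting_sequences
-- ===== SOURCE A (Python) =====
-- def find_interesting_sequences(martingale_bets, martingale_bankrolls):
--     """
--     Find interesting sequences in Martingale betting pattern
--     """
--     sequences = []
--     current_sequence = []
--
--     for i, bet in enumerate(martingale_bets):
--         if not current_sequence:
--             current_sequence.append((i, bet, martingale_bankrolls[i]))
--         elif bet > current_sequence[-1][1]:
--             # Bet increased - continuing losing streak
--             current_sequence.append((i, bet, martingale_bankrolls[i]))
--         else:
--             # Bet reset - streak ended (either win or new sequence)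
--             if len(current_sequence) >= 3:  # Sequences of 3+ losses
--                 sequences.append(current_sequence)
--             current_sequence = [(i, bet, martingale_bankrolls[i])]
--
--     # Don't forget the last sequence
--     if len(current_sequence) >= 3:
--         sequences.append(current_sequence)
--
--     return sequences
-- ===== SOURCE B (Python) =====
-- def find_interesting_sequences(martingale_bets, martingale_bankrolls):
--     """
--     Find interesting sequences in Martingale betting pattern.
--     Label-and-bucket: assign each position a run id (incremented whenever the
--     bet does not strictly increase), bucket the (index, bet, bankroll) triples
--     into a dict keyed by run id, then keep the buckets with 3+ entries.
--     """
--     labels = []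
--     run_id = 0
--     prev = None
--     for bet in martingale_bets:
--         if prev is not None and bet <= prev:
--             run_id += 1
--         labels.append(run_id)
--         prev = bet
--     groups = {}
--     for i, lab in enumerate(labels):
--         groups.setdefault(lab, []).append((i, martingale_bets[i], martingale_bankrolls[i]))
--     return [g for g in groups.values() if len(g) >= 3]
-- ===== Notes on version B (the rewrite author's own statement) =====
-- stated objective: alternative
-- what changed: Replaced A's single-pass state machine (growing current_sequence with inline and trailing flushes) by a label-and-bucket scheme: a first pass assigns each position a run id (incremented at every non-increase), a dict then buckets the (index, bet, bankroll) triples by run id, and the result is the buckets with 3+ entries.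
import Mathlib
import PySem

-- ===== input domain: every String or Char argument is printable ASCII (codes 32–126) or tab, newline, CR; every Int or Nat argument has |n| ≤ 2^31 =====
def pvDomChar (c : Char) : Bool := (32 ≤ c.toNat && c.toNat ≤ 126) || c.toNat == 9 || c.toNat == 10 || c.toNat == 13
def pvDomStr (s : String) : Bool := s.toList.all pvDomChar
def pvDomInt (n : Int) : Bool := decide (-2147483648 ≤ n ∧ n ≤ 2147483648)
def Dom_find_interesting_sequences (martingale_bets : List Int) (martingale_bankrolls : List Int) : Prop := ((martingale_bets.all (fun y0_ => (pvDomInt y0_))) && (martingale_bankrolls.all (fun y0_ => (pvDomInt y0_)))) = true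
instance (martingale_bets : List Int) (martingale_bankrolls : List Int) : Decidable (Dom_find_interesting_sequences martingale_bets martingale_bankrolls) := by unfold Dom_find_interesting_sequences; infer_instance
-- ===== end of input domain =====

-- B replaces A's one-pass state machine (growing current_sequence with inline and trailing
-- flushes) by a label-and-bucket scheme: a labeling pass assigns run ids, a dict buckets the
-- triples by run id, buckets of size 3+ are kept; alternative decomposition, same complexity.
-- Pre_ excludes inputs where A raises IndexError (bankrolls shorter than bets).


-- ===== PORT A =====
-- the loop body of A: state = (sequences, current_sequence), one enumerate item (i, bet);
-- martingale_bankrolls[i] is ported as pyGet? … |>.getD 0, exact when i is in range (guaranteed by Pre_);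
-- current_sequence[-1] on the nonempty current_sequence c :: cs is cs.getLastD c
def pvStepA (martingale_bankrolls : List Int)
    (st : List (List (Int × Int × Int)) × List (Int × Int × Int)) (p : Int × Int) :
    List (List (Int × Int × Int)) × List (Int × Int × Int) :=
  let t : Int × Int × Int := (p.1, p.2, ((PySem.List.pyGet? martingale_bankrolls p.1).getD 0))
  match st with
  | (seqs, []) => (seqs, [t])
  | (seqs, c :: cs) =>
    if p.2 > (cs.getLastD c).2.1 then (seqs, (c :: cs) ++ [t])
    else (if 3 ≤ (c :: cs).length then seqs ++ [c :: cs] else seqs, [t])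

def find_interesting_sequences (martingale_bets : List Int) (martingale_bankrolls : List Int) : List (List (Int × Int × Int)) :=
  let st := (PySem.List.enumerate martingale_bets 0).foldl (pvStepA martingale_bankrolls) ([], [])
  -- "Don't forget the last sequence"
  if 3 ≤ st.2.length then st.1 ++ [st.2] else st.1

-- ===== PORT B =====
-- first pass of Source B: labels, run_id, prev — run_id incremented when bet <= prev
def pvLabels : List Int → Nat → Option Int → List Nat
  | [], _, _ => []
  | b :: bs, r, prev =>
    let r' := match prev with
      | some p => if b ≤ p then r + 1 else r
      | none => r
    r' :: pvLabels bs r' (some b)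

-- the (i, martingale_bets[i], martingale_bankrolls[i]) triple; pyGet? …getD 0 is exact in range
def pvTripleAt (martingale_bets : List Int) (martingale_bankrolls : List Int) (i : Int) :
    Int × Int × Int :=
  (i, (PySem.List.pyGet? martingale_bets i).getD 0, (PySem.List.pyGet? martingale_bankrolls i).getD 0)

def find_interesting_sequences_alt (martingale_bets : List Int) (martingale_bankrolls : List Int) : List (List (Int × Int × Int)) :=
  let labels := pvLabels martingale_bets 0 none
  -- groups.setdefault(lab, []).append(triple) = modify lab [] (· ++ [triple])
  let groups : PySem.Dict Nat (List (Int × Int × Int)) :=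
    (PySem.List.enumerate labels 0).foldl
      (fun d p => d.modify p.2 [] (fun g => g ++ [pvTripleAt martingale_bets martingale_bankrolls p.1]))
      PySem.Dict.empty
  (PySem.Dict.values groups).filter (fun g => decide (3 ≤ g.length))

-- ===== PRECONDITION & SPEC =====
-- Pre_ excludes exactly the inputs where A raises IndexError on martingale_bankrolls[i]
-- (i.e. bankrolls shorter than bets); A returns normally on every other input.
def Pre_find_interesting_sequences (martingale_bets : List Int) (martingale_bankrolls : List Int) : Prop :=
  martingale_bets.length ≤ martingale_bankrolls.length
instance (martingale_bets : List Int) (martingale_bankrolls : List Int) : Decidable (Pre_find_interesting_sequences martingale_bets martingale_bankrolls) := by unfold Pre_find_interesting_sequences; infer_instance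

def pvWitness_find_interesting_sequences : List Int × List Int := ([1, 2, 4, 1, 2, 3, 4, 1], [9, 8, 7, 6, 5, 4, 3, 2])

def Spec_find_interesting_sequences (martingale_bets : List Int) (martingale_bankrolls : List Int) (out : List (List (Int × Int × Int))) : Prop := out = find_interesting_sequences_alt martingale_bets martingale_bankrolls
instance (martingale_bets : List Int) (martingale_bankrolls : List Int) (out : List (List (Int × Int × Int))) : Decidable (Spec_find_interesting_sequences martingale_bets martingale_bankrolls out) := by unfold Spec_find_interesting_sequences; infer_instance

-- ===== CLAIM (what is proved, stated in full; the proofs are below) =====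
def Claim_equal_find_interesting_sequences : Prop := ∀ (martingale_bets : List Int) (martingale_bankrolls : List Int), Dom_find_interesting_sequences martingale_bets martingale_bankrolls → Pre_find_interesting_sequences martingale_bets martingale_bankrolls → Spec_find_interesting_sequences martingale_bets martingale_bankrolls (find_interesting_sequences martingale_bets martingale_bankrolls)

-- ===== LEMMAS AND PROOFS =====

-- canonical middle form: worklist of triples, split off the maximal strictly-increasing run
def pvTakeRunGo (run : List (Int × Int × Int)) (prev : Int) :
    List (Int × Int × Int) → List (Int × Int × Int) × List (Int × Int × Int)
  | [] => (run, [])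
  | t :: ts => if t.2.1 > prev then pvTakeRunGo (run ++ [t]) t.2.1 ts else (run, t :: ts)

-- length of the maximal prefix chain strictly increasing above prev
def pvSpanLenT (prev : Int) : List (Int × Int × Int) → Nat
  | [] => 0
  | t :: ts => if t.2.1 > prev then pvSpanLenT t.2.1 ts + 1 else 0

theorem pvSpanLenT_le (prev : Int) (ts : List (Int × Int × Int)) : pvSpanLenT prev ts ≤ ts.length := by
  induction ts generalizing prev with
  | nil => simp [pvSpanLenT]
  | cons t ts ih =>
    simp only [pvSpanLenT, List.length_cons]
    split
    · have := ih t.2.1; omega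
    · omega

theorem pvTakeRunGo_eq (ts : List (Int × Int × Int)) (run : List (Int × Int × Int)) (prev : Int) :
    pvTakeRunGo run prev ts = (run ++ ts.take (pvSpanLenT prev ts), ts.drop (pvSpanLenT prev ts)) := by
  induction ts generalizing run prev with
  | nil => simp [pvTakeRunGo, pvSpanLenT]
  | cons t ts ih =>
    simp only [pvTakeRunGo, pvSpanLenT]
    split
    · rw [ih]; simp
    · simp

theorem pvTakeRunGo_snd_le (ts : List (Int × Int × Int)) (run : List (Int × Int × Int)) (prev : Int) :
    (pvTakeRunGo run prev ts).2.length ≤ ts.length := by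
  rw [pvTakeRunGo_eq]; simp

def pvAltLoop : List (Int × Int × Int) → List (List (Int × Int × Int)) → List (List (Int × Int × Int))
  | [], res => res
  | t :: ts, res =>
    let pr := pvTakeRunGo [t] t.2.1 ts
    pvAltLoop pr.2 (res ++ if 3 ≤ pr.1.length then [pr.1] else [])
termination_by ts => ts.length
decreasing_by have := pvTakeRunGo_snd_le ts [t] t.2.1; simpa using Nat.lt_succ_of_le this

theorem pvAltLoop_nil (res : List (List (Int × Int × Int))) : pvAltLoop [] res = res := by
  rw [pvAltLoop]

theorem pvAltLoop_cons (t : Int × Int × Int) (ts : List (Int × Int × Int))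
    (res : List (List (Int × Int × Int))) :
    pvAltLoop (t :: ts) res =
    pvAltLoop (pvTakeRunGo [t] t.2.1 ts).2
      (res ++ if 3 ≤ (pvTakeRunGo [t] t.2.1 ts).1.length then [(pvTakeRunGo [t] t.2.1 ts).1] else []) := by
  rw [pvAltLoop]

-- the triple-level step of A's loop and its flush epilogue
def pvStepT (st : List (List (Int × Int × Int)) × List (Int × Int × Int)) (t : Int × Int × Int) :
    List (List (Int × Int × Int)) × List (Int × Int × Int) :=
  match st with
  | (seqs, []) => (seqs, [t])
  | (seqs, c :: cs) =>
    if t.2.1 > (cs.getLastD c).2.1 then (seqs, (c :: cs) ++ [t])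
    else (if 3 ≤ (c :: cs).length then seqs ++ [c :: cs] else seqs, [t])

def pvFinish (st : List (List (Int × Int × Int)) × List (Int × Int × Int)) : List (List (Int × Int × Int)) :=
  if 3 ≤ st.2.length then st.1 ++ [st.2] else st.1

def pvTriple (martingale_bankrolls : List Int) (p : Int × Int) : Int × Int × Int :=
  (p.1, p.2, ((PySem.List.pyGet? martingale_bankrolls p.1).getD 0))

theorem pvStepA_eq (banks : List Int) (st : List (List (Int × Int × Int)) × List (Int × Int × Int))
    (p : Int × Int) : pvStepA banks st p = pvStepT st (pvTriple banks p) := by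
  obtain ⟨seqs, cur⟩ := st
  cases cur <;> rfl

-- A's loop, started with a nonempty current_sequence c :: cs, equals the canonical worklist loop
theorem pvL (ts : List (Int × Int × Int)) : ∀ (c : Int × Int × Int) (cs : List (Int × Int × Int))
    (seqs : List (List (Int × Int × Int))),
    pvFinish (ts.foldl pvStepT (seqs, c :: cs)) =
    pvAltLoop (pvTakeRunGo (c :: cs) (cs.getLastD c).2.1 ts).2
      (seqs ++ if 3 ≤ (pvTakeRunGo (c :: cs) (cs.getLastD c).2.1 ts).1.length
               then [(pvTakeRunGo (c :: cs) (cs.getLastD c).2.1 ts).1] else []) := by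
  induction ts with
  | nil =>
    intro c cs seqs
    simp only [List.foldl_nil, pvTakeRunGo, pvAltLoop, pvFinish]
    split <;> simp
  | cons t ts ih =>
    intro c cs seqs
    simp only [List.foldl_cons, pvStepT, pvTakeRunGo]
    by_cases hgt : t.2.1 > (cs.getLastD c).2.1
    · simp only [if_pos hgt]
      have h3 : ((cs ++ [t]).getLastD c) = t := by simp
      rw [show (c :: cs) ++ [t] = c :: (cs ++ [t]) from rfl]
      rw [ih c (cs ++ [t]) seqs, h3]
    · simp only [if_neg hgt]
      rw [ih t [] _]
      simp only [List.getLastD_nil]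
      rw [pvAltLoop_cons]
      split <;> simp

-- A equals the canonical worklist loop on its own triple list
theorem pvA_eq_canon (bets banks : List Int) :
    find_interesting_sequences bets banks =
    pvAltLoop ((PySem.List.enumerate bets 0).map (pvTriple banks)) [] := by
  have hstep : pvStepA banks = fun st p => pvStepT st (pvTriple banks p) := by
    funext st p; exact pvStepA_eq banks st p
  show pvFinish ((PySem.List.enumerate bets 0).foldl (pvStepA banks) ([], [])) = _
  rw [hstep, ← List.foldl_map]
  generalize ((PySem.List.enumerate bets 0).map (pvTriple banks)) = ts
  cases ts with
  | nil => rw [pvAltLoop_nil]; rfl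
  | cons t rest =>
    rw [List.foldl_cons]
    rw [show pvStepT ([], []) t = ([], [t]) from rfl]
    rw [pvL rest t [] []]
    rw [pvAltLoop_cons]
    simp

-- the list of maximal strictly-increasing runs of a triple list
def pvRuns : List (Int × Int × Int) → List (List (Int × Int × Int))
  | [] => []
  | t :: ts => (pvTakeRunGo [t] t.2.1 ts).1 :: pvRuns (pvTakeRunGo [t] t.2.1 ts).2
termination_by ts => ts.length
decreasing_by have := pvTakeRunGo_snd_le ts [t] t.2.1; simpa using Nat.lt_succ_of_le this

theorem pvAltLoop_eq_runs (l : List (Int × Int × Int)) :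
    ∀ res, pvAltLoop l res = res ++ (pvRuns l).filter (fun g => decide (3 ≤ g.length)) := by
  fun_induction pvRuns l with
  | case1 => intro res; rw [pvAltLoop_nil]; simp
  | case2 t ts ih =>
    intro res
    rw [pvAltLoop_cons, ih]
    rw [List.filter_cons]
    by_cases h : 3 ≤ (pvTakeRunGo [t] t.2.1 ts).1.length
    · simp [h]
    · simp [h]

-- every run produced by pvRuns is nonempty
theorem pvRuns_ne_nil (l : List (Int × Int × Int)) : ∀ g ∈ pvRuns l, g ≠ [] := by
  fun_induction pvRuns l with
  | case1 => simp
  | case2 t ts ih =>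
    intro g hg
    rcases List.mem_cons.mp hg with h | h
    · subst h; rw [pvTakeRunGo_eq]; simp
    · exact ih g h

-- tag run j's elements with key r + j
def pvTag : Nat → List (List (Int × Int × Int)) → List (Nat × (Int × Int × Int))
  | _, [] => []
  | r, g :: gs => g.map (fun t => (r, t)) ++ pvTag (r + 1) gs

theorem pvTag_fst_ge (gs : List (List (Int × Int × Int))) :
    ∀ r p, p ∈ pvTag r gs → r ≤ p.1 := by
  induction gs with
  | nil => intro r p hp; simp [pvTag] at hp
  | cons g gs ih =>
    intro r p hp
    rw [show pvTag r (g :: gs) = g.map (fun t => (r, t)) ++ pvTag (r + 1) gs from rfl] at hp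
    rcases List.mem_append.mp hp with h | h
    · obtain ⟨t, _, ht⟩ := List.mem_map.mp h
      simp [← ht]
    · have := ih (r + 1) p h; omega

-- labels length
theorem length_pvLabels (bs : List Int) : ∀ r prev, (pvLabels bs r prev).length = bs.length := by
  induction bs with
  | nil => intro r prev; rfl
  | cons b bs ih => intro r prev; simp [pvLabels, ih]

-- labels within a strictly increasing span stay r, then restart at r+1
theorem pvRun_labels (ts : List (Int × Int × Int)) : ∀ (p : Int) (r : Nat),
    pvLabels (ts.map (fun t => t.2.1)) r (some p) =
    List.replicate (pvSpanLenT p ts) r ++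
      pvLabels ((ts.drop (pvSpanLenT p ts)).map (fun t => t.2.1)) (r + 1) none := by
  induction ts with
  | nil => intro p r; rfl
  | cons t ts ih =>
    intro p r
    by_cases hb : t.2.1 ≤ p
    · simp only [pvSpanLenT, if_neg (by omega : ¬ t.2.1 > p), List.replicate_zero,
        List.nil_append, List.drop_zero]
      simp [pvLabels, if_pos hb]
    · simp only [pvSpanLenT, if_pos (by omega : t.2.1 > p)]
      simp only [List.map_cons, pvLabels, if_neg hb]
      rw [ih t.2.1 r]
      simp [List.replicate_succ]

-- zip distributes over an append on the left
theorem pvZipSplit {α β : Type} (as bs : List α) (cs : List β) :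
    (as ++ bs).zip cs = as.zip (cs.take as.length) ++ bs.zip (cs.drop as.length) := by
  induction as generalizing cs with
  | nil => simp
  | cons a as iha =>
    cases cs with
    | nil => simp
    | cons c cs => simp [iha]

-- zipping a replicated label tags a prefix
theorem pvZipReplicate {α β : Type} (r : α) (n : Nat) (cs : List β) :
    (List.replicate n r).zip cs = (cs.take n).map (fun x => (r, x)) := by
  induction n generalizing cs with
  | zero => simp
  | succ n ihn =>
    cases cs with
    | nil => simp
    | cons c cs => simp [List.replicate_succ, ihn]

-- MAIN: zipping the labels with the triples tags each run with its id
theorem pvLabels_zip_tag (fuel : Nat) : ∀ (ts : List (Int × Int × Int)) (r : Nat),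
    ts.length ≤ fuel →
    (pvLabels (ts.map (fun t => t.2.1)) r none).zip ts = pvTag r (pvRuns ts) := by
  induction fuel with
  | zero =>
    intro ts r h
    have : ts = [] := List.length_eq_zero_iff.mp (by omega)
    subst this
    rw [show pvRuns ([] : List (Int × Int × Int)) = [] from by rw [pvRuns]]
    rfl
  | succ fuel ih =>
    intro ts r h
    cases ts with
    | nil =>
      rw [show pvRuns ([] : List (Int × Int × Int)) = [] from by rw [pvRuns]]
      rfl
    | cons t ts' =>
      have hmle : pvSpanLenT t.2.1 ts' ≤ ts'.length := pvSpanLenT_le _ _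
      have hih := ih (ts'.drop (pvSpanLenT t.2.1 ts')) (r + 1)
        (by simp only [List.length_drop, List.length_cons] at h ⊢; omega)
      simp only [List.map_cons, pvLabels]
      rw [pvRun_labels ts' t.2.1 r]
      rw [show pvRuns (t :: ts') =
        (pvTakeRunGo [t] t.2.1 ts').1 :: pvRuns (pvTakeRunGo [t] t.2.1 ts').2 from by rw [pvRuns]]
      rw [pvTakeRunGo_eq]
      rw [show ([t] ++ ts'.take (pvSpanLenT t.2.1 ts'),
            ts'.drop (pvSpanLenT t.2.1 ts')).1 = t :: ts'.take (pvSpanLenT t.2.1 ts') from rfl]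
      rw [show ([t] ++ ts'.take (pvSpanLenT t.2.1 ts'),
            ts'.drop (pvSpanLenT t.2.1 ts')).2 = ts'.drop (pvSpanLenT t.2.1 ts') from rfl]
      rw [show pvTag r ((t :: ts'.take (pvSpanLenT t.2.1 ts')) :: pvRuns (ts'.drop (pvSpanLenT t.2.1 ts'))) =
        (t :: ts'.take (pvSpanLenT t.2.1 ts')).map (fun x => (r, x)) ++
          pvTag (r + 1) (pvRuns (ts'.drop (pvSpanLenT t.2.1 ts'))) from rfl]
      rw [List.zip_cons_cons]
      rw [pvZipSplit, List.length_replicate, pvZipReplicate, List.take_take, Nat.min_self]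
      rw [hih]
      simp

-- a nonempty replicate dedups to the single element
theorem pvOfList_replicate (n : Nat) (r : Nat) :
    PySem.Set.ofList (List.replicate (n + 1) r) = [r] := by
  induction n with
  | zero => rfl
  | succ n ihn =>
    rw [List.replicate_succ, PySem.Set.ofList_cons, ihn]
    simp [PySem.Set.discard]

-- the set of keys of a tagged nonempty-group list, and grouping back by key, recover the groups
theorem pvGroupValues (gs : List (List (Int × Int × Int))) (hne : ∀ g ∈ gs, g ≠ []) :
    ∀ r, (PySem.Set.ofList ((pvTag r gs).map (fun p => p.1))).map
      (fun lab => ((pvTag r gs).filter (fun p => p.1 == lab)).map (fun p => p.2)) = gs := by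
  induction gs with
  | nil => intro r; rfl
  | cons g gs ih =>
    intro r
    have hg : g ≠ [] := hne g (by simp)
    have hrest : ∀ p ∈ pvTag (r + 1) gs, r + 1 ≤ p.1 := pvTag_fst_ge gs (r + 1)
    have hkeys : ((pvTag r (g :: gs)).map (fun p => p.1)) =
        List.replicate g.length r ++ (pvTag (r + 1) gs).map (fun p => p.1) := by
      show ((g.map (fun t => (r, t)) ++ pvTag (r + 1) gs).map (fun p => p.1)) = _
      simp [List.map_map]
    -- set of keys = r :: set of the rest's keys
    have hset : PySem.Set.ofList ((pvTag r (g :: gs)).map (fun p => p.1)) =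
        r :: PySem.Set.ofList ((pvTag (r + 1) gs).map (fun p => p.1)) := by
      rw [hkeys]
      rw [PySem.Set.ofList_append]
      have h1 : PySem.Set.ofList (List.replicate g.length r) = [r] := by
        obtain ⟨x, xs, hx⟩ := List.exists_cons_of_ne_nil hg
        rw [hx]
        exact pvOfList_replicate xs.length r
      rw [h1]
      rw [PySem.Set.update_eq_append_filter]
      have : (PySem.Set.ofList ((pvTag (r + 1) gs).map (fun p => p.1))).filter
          (fun y => !(PySem.Set.contains [r] y)) =
          PySem.Set.ofList ((pvTag (r + 1) gs).map (fun p => p.1)) := by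
        apply List.filter_eq_self.mpr
        intro y hy
        have hy' : y ∈ (pvTag (r + 1) gs).map (fun p => p.1) := by
          exact (PySem.Set.mem_ofList _ _).mp hy
        obtain ⟨p, hp, hpy⟩ := List.mem_map.mp hy'
        have : r + 1 ≤ y := by rw [← hpy]; exact hrest p hp
        simp [PySem.Set.contains]
        omega
      rw [this]
      rfl
    rw [hset, List.map_cons]
    congr 1
    · -- bucket at key r is exactly g
      show (((g.map (fun t => (r, t)) ++ pvTag (r + 1) gs).filter (fun p => p.1 == r)).map
        (fun p => p.2)) = g
      rw [List.filter_append]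
      have h1 : (g.map (fun t => (r, t))).filter (fun p => p.1 == r) = g.map (fun t => (r, t)) := by
        apply List.filter_eq_self.mpr
        intro p hp
        obtain ⟨t, _, ht⟩ := List.mem_map.mp hp
        simp [← ht]
      have h2 : (pvTag (r + 1) gs).filter (fun p => p.1 == r) = [] := by
        apply List.filter_eq_nil_iff.mpr
        intro p hp
        have := hrest p hp
        simp; omega
      rw [h1, h2, List.append_nil, List.map_map]
      simp
    · -- buckets at the later keys ignore the first block
      have htail := ih (fun g hg => hne g (by simp [hg])) (r + 1)
      refine Eq.trans (List.map_congr_left ?_) htail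
      intro lab hlab
      have hlab' : r + 1 ≤ lab := by
        have : lab ∈ (pvTag (r + 1) gs).map (fun p => p.1) :=
          (PySem.Set.mem_ofList _ _).mp hlab
        obtain ⟨p, hp, hpy⟩ := List.mem_map.mp this
        rw [← hpy]; exact hrest p hp
      show (((g.map (fun t => (r, t)) ++ pvTag (r + 1) gs).filter (fun p => p.1 == lab)).map
        (fun p => p.2)) = _
      rw [List.filter_append]
      have h1 : (g.map (fun t => (r, t))).filter (fun p => p.1 == lab) = [] := by
        apply List.filter_eq_nil_iff.mpr
        intro p hp
        obtain ⟨t, _, ht⟩ := List.mem_map.mp hp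
        simp [← ht]; omega
      rw [h1, List.nil_append]

-- B's enumerate-and-lookup pair list is the labels zipped with A's triple list
theorem pvPairs_eq (bets banks : List Int) :
    (PySem.List.enumerate (pvLabels bets 0 none) 0).map
      (fun p => (p.2, pvTripleAt bets banks p.1)) =
    (pvLabels bets 0 none).zip ((PySem.List.enumerate bets 0).map (pvTriple banks)) := by
  apply List.ext_getElem
  · simp [PySem.List.length_enumerate, length_pvLabels]
  · intro k h1 h2
    have hkb : k < bets.length := by
      simpa [PySem.List.length_enumerate, length_pvLabels] using h1
    have hkl : k < (pvLabels bets 0 none).length := by rw [length_pvLabels]; exact hkb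
    rw [List.getElem_map, List.getElem_zip, List.getElem_map]
    rw [PySem.List.getElem_enumerate, PySem.List.getElem_enumerate]
    simp only [pvTripleAt, pvTriple]
    have hbets : (PySem.List.pyGet? bets ((0 : Int) + (k : Nat))).getD 0 = bets[k] := by
      rw [show ((0 : Int) + (k : Nat)) = ((k : Nat) : Int) by omega, PySem.List.pyGet?_natCast]
      simp [List.getElem?_eq_getElem hkb]
    rw [hbets]

-- B computed down to "bucket the tagged runs and read the buckets back"
theorem pvB_canon (bets banks : List Int) :
    find_interesting_sequences_alt bets banks =
    (pvRuns ((PySem.List.enumerate bets 0).map (pvTriple banks))).filter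
      (fun g => decide (3 ≤ g.length)) := by
  have hb : bets = ((PySem.List.enumerate bets 0).map (pvTriple banks)).map (fun t => t.2.1) := by
    rw [List.map_map]
    have : ((fun t => t.2.1) ∘ pvTriple banks) = fun (p : Int × Int) => p.2 := by
      funext p; rfl
    rw [this, PySem.List.map_snd_enumerate]
  show ((PySem.List.enumerate (pvLabels bets 0 none) 0).foldl
      (fun d p => d.modify p.2 [] (fun g => g ++ [pvTripleAt bets banks p.1]))
      PySem.Dict.empty).values.filter (fun g => decide (3 ≤ g.length)) = _
  have hfold : (PySem.List.enumerate (pvLabels bets 0 none) 0).foldl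
      (fun d p => d.modify p.2 [] (fun g => g ++ [pvTripleAt bets banks p.1]))
      PySem.Dict.empty
    = ((pvLabels bets 0 none).zip ((PySem.List.enumerate bets 0).map (pvTriple banks))).foldl
        (fun d q => d.modify q.1 [] (fun g => g ++ [q.2])) PySem.Dict.empty := by
    rw [← pvPairs_eq bets banks, List.foldl_map]
  rw [hfold]
  have hpairs : (pvLabels bets 0 none).zip ((PySem.List.enumerate bets 0).map (pvTriple banks)) =
      pvTag 0 (pvRuns ((PySem.List.enumerate bets 0).map (pvTriple banks))) := by
    have h := pvLabels_zip_tag ((PySem.List.enumerate bets 0).map (pvTriple banks)).length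
      ((PySem.List.enumerate bets 0).map (pvTriple banks)) 0 le_rfl
    rw [← hb] at h
    exact h
  rw [hpairs]
  set ps := pvTag 0 (pvRuns ((PySem.List.enumerate bets 0).map (pvTriple banks))) with hps
  have hnodup : (ps.foldl (fun d q => d.modify q.1 [] (fun g => g ++ [q.2]))
      PySem.Dict.empty).keys.Nodup :=
    PySem.Dict.nodup_keys_foldl_modify_key ps Prod.fst [] (fun _ q => fun g => g ++ [q.2])
      PySem.Dict.empty (by rw [PySem.Dict.keys_empty]; exact List.nodup_nil)
  rw [PySem.Dict.values_eq_map_keys _ hnodup []]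
  have hkeys : (ps.foldl (fun d q => d.modify q.1 [] (fun g => g ++ [q.2]))
      PySem.Dict.empty).keys = PySem.Set.ofList (ps.map (fun p => p.1)) := by
    rw [PySem.Dict.keys_foldl_modify_key ps Prod.fst [] (fun _ q => fun g => g ++ [q.2])
      PySem.Dict.empty]
    rw [PySem.Dict.keys_empty, PySem.Set.update_nil_left]
  rw [hkeys]
  simp only [PySem.Dict.getD_foldl_modify_append, PySem.Dict.getD_empty, List.nil_append]
  rw [hps, pvGroupValues _ (pvRuns_ne_nil _) 0]

-- ===== VERDICT (by name: the statement is the Claim_ definition above) =====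
theorem find_interesting_sequences_spec : Claim_equal_find_interesting_sequences := by
  intro bets banks _hdom _hpre
  unfold Spec_find_interesting_sequences
  rw [pvA_eq_canon bets banks, pvAltLoop_eq_runs, List.nil_append, pvB_canon bets banks]
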